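-- pv_equiv track=rewrite | github.com/vishalpmittal/practice-fun | funNLearn/src/main/java/dsAlgo/list/ReductorArray.py | getComparatorVal
-- ===== SOURCE A (Python) =====
-- from typing import List
--
-- def getComparatorVal(a: List[int], b: List[int], d: int) -> int:
--     if not a or not b or d < 0:
--         return 0
--
--     a.sort()
--     b.sort()
--     comparator = 0
--     for x in a:
--         l, r = 0, len(b) - 1
--         while l <= r:
--             mid = (l + r) // 2
--             if abs(b[mid] - x) <= d:
--                 break
--             if x > b[mid]:
--                 l = mid + 1
--             else:
--                 r = mid - 1
--         if l > r:
--             comparator += 1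
--     return comparator
-- ===== SOURCE B (Python) =====
-- from typing import List
--
-- def getComparatorVal(a: List[int], b: List[int], d: int) -> int:
--     if not a or not b or d < 0:
--         return 0
--
--     a.sort()
--     b.sort()
--     comparator = 0
--     j = 0
--     for x in a:
--         while j < len(b) and b[j] < x - d:
--             j += 1
--         if not (j < len(b) and b[j] <= x + d):
--             comparator += 1
--     return comparator
-- ===== Notes on version B (the rewrite author's own statement) =====
-- stated objective: alternative
-- what changed: Replaces the per-element binary search over sorted b with a single monotone two-pointer sweep: one pointer into sorted b is shared and only ever advances across all of sorted a.
import Mathlib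
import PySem

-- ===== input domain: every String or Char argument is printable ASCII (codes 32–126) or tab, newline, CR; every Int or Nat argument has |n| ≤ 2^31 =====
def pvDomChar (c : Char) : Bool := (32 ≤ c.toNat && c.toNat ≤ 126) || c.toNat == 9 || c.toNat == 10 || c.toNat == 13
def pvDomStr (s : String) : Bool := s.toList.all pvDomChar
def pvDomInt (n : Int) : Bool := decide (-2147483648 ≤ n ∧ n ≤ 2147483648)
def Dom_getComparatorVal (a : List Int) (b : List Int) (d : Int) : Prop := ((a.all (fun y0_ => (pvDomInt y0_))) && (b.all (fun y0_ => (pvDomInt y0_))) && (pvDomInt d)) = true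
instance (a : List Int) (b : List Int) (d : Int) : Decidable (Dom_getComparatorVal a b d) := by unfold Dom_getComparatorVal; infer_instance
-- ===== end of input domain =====

-- B replaces A's per-element binary search over sorted b by a single monotone two-pointer
-- sweep (one pointer into sorted b shared across all of sorted a); return values only —
-- both Pythons sort a and b in place (B performs the same mutation).

-- ===== PORT A =====
-- the inner 'while l <= r' binary-search loop; returns the final (l, r)
def bsLoop (b : List Int) (x d l r : Int) : Int × Int :=
  if h : l ≤ r then
    match PySem.List.pyGet? b (PySem.Int.floordiv (l + r) 2) with
    | none => (l, r)  -- unreachable: along the loop 0 ≤ l ≤ mid ≤ r < len b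
    | some bm =>
      if |bm - x| ≤ d then (l, r)
      else if x > bm then bsLoop b x d (PySem.Int.floordiv (l + r) 2 + 1) r
      else bsLoop b x d l (PySem.Int.floordiv (l + r) 2 - 1)
  else (l, r)
termination_by (r + 1 - l).toNat
decreasing_by
  all_goals
    have := PySem.Int.floordiv_two_mid_bounds h
    omega

def getComparatorVal (a : List Int) (b : List Int) (d : Int) : Int :=
  if a = [] ∨ b = [] ∨ d < 0 then 0
  else
    let a' := PySem.List.sorted a (fun x => x) false
    let b' := PySem.List.sorted b (fun x => x) false
    a'.foldl (fun comparator x =>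
      let p := bsLoop b' x d 0 ((b'.length : Int) - 1)
      if p.2 < p.1 then comparator + 1 else comparator) 0

-- ===== PORT B =====
-- the inner 'while j < len(b) and b[j] < x - d: j += 1' loop
def sweepAdv (b : List Int) (x d j : Int) : Int :=
  if h : j < (b.length : Int) then
    match PySem.List.pyGet? b j with
    | none => j  -- unreachable: along the loop 0 ≤ j < len b
    | some bj => if bj < x - d then sweepAdv b x d (j + 1) else j
  else j
termination_by ((b.length : Int) - j).toNat
decreasing_by omega

def getComparatorVal_alt (a : List Int) (b : List Int) (d : Int) : Int :=
  if a = [] ∨ b = [] ∨ d < 0 then 0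
  else
    let a' := PySem.List.sorted a (fun x => x) false
    let b' := PySem.List.sorted b (fun x => x) false
    (a'.foldl (fun (s : Int × Int) x =>
      let j := sweepAdv b' x d s.1
      if j < (b'.length : Int) then
        match PySem.List.pyGet? b' j with
        | none => (j, s.2)  -- unreachable: 0 ≤ j < len b'
        | some bj => if bj ≤ x + d then (j, s.2) else (j, s.2 + 1)
      else (j, s.2 + 1)) ((0 : Int), (0 : Int))).2

-- ===== PRECONDITION & SPEC =====
def Spec_getComparatorVal (a : List Int) (b : List Int) (d : Int) (out : Int) : Prop := out = getComparatorVal_alt a b d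
instance (a : List Int) (b : List Int) (d : Int) (out : Int) : Decidable (Spec_getComparatorVal a b d out) := by unfold Spec_getComparatorVal; infer_instance

-- ===== CLAIM (what is proved, stated in full; the proofs are below) =====
def Claim_equal_getComparatorVal : Prop := ∀ (a : List Int) (b : List Int) (d : Int), Dom_getComparatorVal a b d → Spec_getComparatorVal a b d (getComparatorVal a b d)

-- ===== LEMMAS AND PROOFS =====

-- "no element of b is within distance d of x", stated over indices
def NoNear (b : List Int) (x d : Int) : Prop :=
  ∀ (i : Nat) (hi : i < b.length), b[i] < x - d ∨ x + d < b[i]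

theorem bsLoop_spec (b : List Int) (x d : Int)
    (hmono : ∀ (i j : Nat) (hi : i < b.length) (hj : j < b.length), i ≤ j → b[i] ≤ b[j]) :
    ∀ (n : Nat) (l r : Int), (r + 1 - l).toNat ≤ n → 0 ≤ l → r < (b.length : Int) →
    (∀ (i : Nat) (hi : i < b.length), (i : Int) < l → b[i] < x - d) →
    (∀ (i : Nat) (hi : i < b.length), r < (i : Int) → x + d < b[i]) →
    (((bsLoop b x d l r).2 < (bsLoop b x d l r).1) ↔ NoNear b x d) := by
  intro n
  induction n with
  | zero =>
    intro l r hn hl hr hinv1 hinv2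
    have hrl : ¬ l ≤ r := by omega
    rw [bsLoop, dif_neg hrl]
    constructor
    · intro _ i hi
      by_cases h : (i : Int) < l
      · exact Or.inl (hinv1 i hi h)
      · exact Or.inr (hinv2 i hi (by omega))
    · intro _; exact by omega
  | succ n ih =>
    intro l r hn hl hr hinv1 hinv2
    by_cases hlr : l ≤ r
    · rw [bsLoop, dif_pos hlr]
      obtain ⟨hml, hmr⟩ := PySem.Int.floordiv_two_mid_bounds hlr
      have hm0 : 0 ≤ PySem.Int.floordiv (l + r) 2 := by omega
      have hmlen : PySem.Int.floordiv (l + r) 2 < (b.length : Int) := by omega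
      have hmn : (PySem.Int.floordiv (l + r) 2).toNat < b.length := by omega
      have hget : PySem.List.pyGet? b (PySem.Int.floordiv (l + r) 2)
          = some (b[(PySem.Int.floordiv (l + r) 2).toNat]) :=
        PySem.List.pyGet?_eq_some_getElem b hm0 hmlen
      rw [hget]
      simp only []
      by_cases habs : |b[(PySem.Int.floordiv (l + r) 2).toNat]'hmn - x| ≤ d
      · rw [if_pos habs]
        rw [abs_le] at habs
        constructor
        · intro h; exact absurd h (by omega)
        · intro hnn
          rcases hnn (PySem.Int.floordiv (l + r) 2).toNat hmn with h | h <;> omega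
      · rw [if_neg habs]
        rw [abs_le] at habs
        by_cases hxgt : x > b[(PySem.Int.floordiv (l + r) 2).toNat]'hmn
        · rw [if_pos hxgt]
          refine ih (PySem.Int.floordiv (l + r) 2 + 1) r (by omega) (by omega) hr ?_ hinv2
          intro i hi hil
          calc b[i] ≤ b[(PySem.Int.floordiv (l + r) 2).toNat] :=
                hmono i _ hi hmn (by omega)
            _ < x - d := by omega
        · rw [if_neg hxgt]
          refine ih l (PySem.Int.floordiv (l + r) 2 - 1) (by omega) hl (by omega) hinv1 ?_
          intro i hi hir
          calc x + d < b[(PySem.Int.floordiv (l + r) 2).toNat] := by omega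
            _ ≤ b[i] := hmono _ i hmn hi (by omega)
    · rw [bsLoop, dif_neg hlr]
      constructor
      · intro _ i hi
        by_cases h : (i : Int) < l
        · exact Or.inl (hinv1 i hi h)
        · exact Or.inr (hinv2 i hi (by omega))
      · intro _; exact by omega

theorem sweepAdv_spec (b : List Int) (x d : Int) :
    ∀ (n : Nat) (j : Int), ((b.length : Int) - j).toNat ≤ n → 0 ≤ j →
    j ≤ sweepAdv b x d j ∧
    (∀ (i : Nat) (hi : i < b.length), j ≤ (i : Int) → (i : Int) < sweepAdv b x d j → b[i] < x - d) ∧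
    (∀ (i : Nat) (hi : i < b.length), (i : Int) = sweepAdv b x d j → ¬ b[i] < x - d) := by
  intro n
  induction n with
  | zero =>
    intro j hn hj
    have hnl : ¬ j < (b.length : Int) := by omega
    rw [sweepAdv, dif_neg hnl]
    refine ⟨le_refl _, ?_, ?_⟩
    · intro i hi h1 h2; exact absurd h2 (by omega)
    · intro i hi h1; exact absurd h1 (by omega)
  | succ n ih =>
    intro j hn hj
    rw [sweepAdv]
    by_cases hlt : j < (b.length : Int)
    · rw [dif_pos hlt]
      have hjn : j.toNat < b.length := by omega
      have hget : PySem.List.pyGet? b j = some (b[j.toNat]) :=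
        PySem.List.pyGet?_eq_some_getElem b hj hlt
      rw [hget]
      by_cases hb : b[j.toNat] < x - d
      · simp only [hb, if_true]
        obtain ⟨h1, h3, h4⟩ := ih (j + 1) (by omega) (by omega)
        refine ⟨by omega, ?_, h4⟩
        intro i hi hji hij
        by_cases hie : i = j.toNat
        · subst hie; exact hb
        · exact h3 i hi (by omega) hij
      · simp only [hb, if_false]
        refine ⟨le_refl _, ?_, ?_⟩
        · intro i hi h1 h2; exact absurd h2 (by omega)
        · intro i hi h1
          have : i = j.toNat := by omega
          subst this; exact hb
    · rw [dif_neg hlt]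
      refine ⟨le_refl _, ?_, ?_⟩
      · intro i hi h1 h2; exact absurd h2 (by omega)
      · intro i hi h1; exact absurd h1 (by omega)

theorem fold_eq (b : List Int) (d : Int)
    (hmono : ∀ (i j : Nat) (hi : i < b.length) (hj : j < b.length), i ≤ j → b[i] ≤ b[j]) :
    ∀ (xs : List Int), xs.Pairwise (· ≤ ·) → ∀ (j c : Int), 0 ≤ j →
    (∀ x ∈ xs, ∀ (i : Nat) (hi : i < b.length), (i : Int) < j → b[i] < x - d) →
    (xs.foldl (fun (s : Int × Int) x =>
      let j := sweepAdv b x d s.1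
      if j < (b.length : Int) then
        match PySem.List.pyGet? b j with
        | none => (j, s.2)
        | some bj => if bj ≤ x + d then (j, s.2) else (j, s.2 + 1)
      else (j, s.2 + 1)) (j, c)).2
    = xs.foldl (fun comparator x =>
      let p := bsLoop b x d 0 ((b.length : Int) - 1)
      if p.2 < p.1 then comparator + 1 else comparator) c := by
  intro xs
  induction xs with
  | nil => intro _ j c _ _; rfl
  | cons x xs ih =>
    intro hpw j c hj hinv
    rw [List.pairwise_cons] at hpw
    obtain ⟨hxle, hpw'⟩ := hpw
    simp only [List.foldl_cons]
    obtain ⟨hjj', hseg, hstop⟩ := sweepAdv_spec b x d b.length j (by omega) hj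
    have hj0 : 0 ≤ sweepAdv b x d j := by omega
    have hallseg : ∀ (i : Nat) (hi : i < b.length), (i : Int) < sweepAdv b x d j → b[i] < x - d := by
      intro i hi h
      by_cases h2 : (i : Int) < j
      · exact hinv x (List.mem_cons_self) i hi h2
      · exact hseg i hi (by omega) h
    have hinv' : ∀ x' ∈ xs, ∀ (i : Nat) (hi : i < b.length), (i : Int) < sweepAdv b x d j → b[i] < x' - d := by
      intro x' hx' i hi h
      have := hallseg i hi h
      have := hxle x' hx'
      omega
    have hA := bsLoop_spec b x d hmono b.length 0 ((b.length : Int) - 1) (by omega) (by omega)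
      (by omega) (fun i hi h => absurd h (by omega)) (fun i hi h => absurd h (by omega))
    by_cases hnn : NoNear b x d
    · -- x unmatched: both sides count it
      rw [if_pos (hA.mpr hnn)]
      by_cases hlt : sweepAdv b x d j < (b.length : Int)
      · rw [if_pos hlt]
        have hjn : (sweepAdv b x d j).toNat < b.length := by omega
        rw [PySem.List.pyGet?_eq_some_getElem b hj0 hlt]
        have hbig : x + d < b[(sweepAdv b x d j).toNat] := by
          rcases hnn (sweepAdv b x d j).toNat hjn with h | h
          · exact absurd h (hstop _ hjn (by omega))
          · exact h
        dsimp only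
        rw [if_neg (show ¬ b[(sweepAdv b x d j).toNat] ≤ x + d by omega)]
        exact ih hpw' (sweepAdv b x d j) (c + 1) hj0 hinv'
      · rw [if_neg hlt]
        exact ih hpw' (sweepAdv b x d j) (c + 1) hj0 hinv'
    · -- x matched: neither side counts it
      rw [if_neg (fun h => hnn (hA.mp h))]
      simp only [NoNear, not_forall] at hnn
      obtain ⟨i0, hi0, hno⟩ := hnn
      push Not at hno
      have hi0ge : sweepAdv b x d j ≤ (i0 : Int) := by
        by_contra h
        have := hallseg i0 hi0 (by omega)
        omega
      have hlt : sweepAdv b x d j < (b.length : Int) := by omega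
      rw [if_pos hlt]
      have hjn : (sweepAdv b x d j).toNat < b.length := by omega
      rw [PySem.List.pyGet?_eq_some_getElem b hj0 hlt]
      have hle : b[(sweepAdv b x d j).toNat] ≤ x + d := by
        have := hmono (sweepAdv b x d j).toNat i0 hjn hi0 (by omega)
        omega
      dsimp only
      rw [if_pos hle]
      exact ih hpw' (sweepAdv b x d j) c hj0 hinv'

-- ===== VERDICT (by name: the statement is the Claim_ definition above) =====
theorem getComparatorVal_spec : Claim_equal_getComparatorVal := by
  intro a b d _
  unfold Spec_getComparatorVal getComparatorVal getComparatorVal_alt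
  split_ifs with hg
  · rfl
  · dsimp only
    refine (fold_eq (PySem.List.sorted b (fun x => x) false) d ?_
      (PySem.List.sorted a (fun x => x) false) ?_ 0 0 (le_refl 0) ?_).symm
    · intro i j hi hj hij
      exact PySem.List.sorted_id_getElem_mono b hij hj
    · simpa using PySem.List.sorted_pairwise a (fun x => x)
    · intro x hx i hi h
      exact absurd h (by omega)
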